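-- pv_equiv track=rewrite | github.com/enabledornot/adventofcode | 2024/day12/day12pt2.py | numberize_data
-- ===== SOURCE A (Python) =====
-- def findNewPoints(data,cpoint):
--     newp = []
--     for offset in [[-1,0],[1,0],[0,1],[0,-1]]:
--         potential = cpoint.copy()
--         potential[0] += offset[0]
--         potential[1] += offset[1]
--         if potential[0] >= 0 and potential[0] < len(data) and potential[1] >= 0 and potential[1] < len(data[0]):
--             newp.append(potential)
--     return newp
--
-- def rec_explore(data, e_value,n_value, p):
--     if data[p[0]][p[1]] != e_value:
--         return
--     data[p[0]][p[1]] = n_value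
--     for newPoint in findNewPoints(data,p):
--         rec_explore(data, e_value, n_value, newPoint)
--
-- def numberize_data(data):
--     indx_cnt = 1
--     lookup_num = ['+']
--     for i in range(len(data)):
--         for ii in range(len(data[i])):
--             currentPoint = [i,ii]
--             currentValue = data[i][ii]
--             if isinstance(currentValue,str):
--                 if currentValue in lookup_num:
--                     lookup_num.append(currentValue.lower())
--                 else:
--                     lookup_num.append(currentValue)
--                 rec_explore(data,currentValue,indx_cnt,currentPoint)
--                 indx_cnt += 1
--     return lookup_num
-- ===== SOURCE B (Python) =====
-- # Iterative flood fill with an explicit stack instead of rec_explore's recursion.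
-- # Mutates data in place exactly like A; the proved equivalence is about the return value.
-- def numberize_data(data):
--     indx_cnt = 1
--     lookup_num = ['+']
--     for i in range(len(data)):
--         for ii in range(len(data[i])):
--             currentValue = data[i][ii]
--             if isinstance(currentValue, str):
--                 if currentValue in lookup_num:
--                     lookup_num.append(currentValue.lower())
--                 else:
--                     lookup_num.append(currentValue)
--                 stack = [[i, ii]]
--                 while stack:
--                     r, c = stack.pop()
--                     if data[r][c] != currentValue:
--                         continue
--                     data[r][c] = indx_cnt
--                     for dr, dc in ((0, -1), (0, 1), (1, 0), (-1, 0)):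
--                         nr, nc = r + dr, c + dc
--                         if 0 <= nr < len(data) and 0 <= nc < len(data[0]):
--                             stack.append([nr, nc])
--                 indx_cnt += 1
--     return lookup_num
-- ===== Notes on version B (the rewrite author's own statement) =====
-- stated objective: alternative
-- what changed: rec_explore's recursive flood fill is replaced by an iterative flood fill with an explicit stack (pop, re-check the cell's value, relabel, push in-bounds 4-neighbours); the outer double loop and the lookup_num append/lower logic are unchanged.
import Mathlib
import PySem

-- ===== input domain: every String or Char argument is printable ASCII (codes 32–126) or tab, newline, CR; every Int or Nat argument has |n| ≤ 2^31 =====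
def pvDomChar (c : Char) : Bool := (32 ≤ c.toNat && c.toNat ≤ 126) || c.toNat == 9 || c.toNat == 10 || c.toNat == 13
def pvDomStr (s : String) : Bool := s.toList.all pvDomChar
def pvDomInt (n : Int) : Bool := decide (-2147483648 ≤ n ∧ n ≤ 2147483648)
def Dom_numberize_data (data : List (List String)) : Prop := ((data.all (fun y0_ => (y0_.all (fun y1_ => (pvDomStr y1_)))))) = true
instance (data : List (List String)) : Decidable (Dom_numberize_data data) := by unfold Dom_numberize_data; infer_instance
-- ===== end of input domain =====

-- B replaces rec_explore's recursion by an iterative flood fill over an explicit stack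
-- (alternative decomposition; same outer loop and lookup logic). Both Pythons mutate
-- `data` in place identically; the equivalence proved here is about the return value.

-- Cells of the working grid: strings initially, ints after relabelling (Python mutates in place).
abbrev PvCell := String ⊕ Int
abbrev PvGrid := List (List PvCell)

-- data[p0][p1] read; total with a non-string default — exact inside Pre_ (all reads in range there).
def pvGet (g : PvGrid) (p : Int × Int) : PvCell :=
  if 0 ≤ p.1 ∧ 0 ≤ p.2 then (g.getD p.1.toNat []).getD p.2.toNat (Sum.inr 0) else Sum.inr 0

-- data[p0][p1] = v assignment; out-of-range writes never happen inside Pre_.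
def pvSet (g : PvGrid) (p : Int × Int) (v : PvCell) : PvGrid :=
  if 0 ≤ p.1 ∧ 0 ≤ p.2 then g.set p.1.toNat ((g.getD p.1.toNat []).set p.2.toNat v) else g

-- the bounds test `0 <= r < len(data) and 0 <= c < len(data[0])` (identical in A and B)
def pvInb (g : PvGrid) (q : Int × Int) : Bool :=
  decide (0 ≤ q.1) && decide (q.1 < (g.length : Int)) && decide (0 ≤ q.2) && decide (q.2 < ((g.getD 0 []).length : Int))

-- number of cells still equal to the explored string e (termination measure for B's port)
def pvCount (e : String) (g : PvGrid) : Nat :=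
  (g.map (fun row => row.countP (fun c => decide (c = Sum.inl e)))).sum

-- ===== PORT A =====
def findNewPoints (g : PvGrid) (p : Int × Int) : List (Int × Int) :=
  [((-1 : Int), (0 : Int)), (1, 0), (0, 1), (0, -1)].foldl
    (fun acc o =>
      let q := (p.1 + o.1, p.2 + o.2)
      if pvInb g q then acc ++ [q] else acc) []

-- rec_explore; the fuel is only a totality guard: numberize_data passes |cells| + 1, which is
-- never exhausted (each nested call relabels a distinct cell), so the port is exact.
def recExplore (e : String) (nv : Int) : Nat → PvGrid → Int × Int → PvGrid
  | 0, g, _ => g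
  | f + 1, g, p =>
    if pvGet g p ≠ Sum.inl e then g
    else
      let g' := pvSet g p (Sum.inr nv)
      (findNewPoints g' p).foldl (recExplore e nv f) g'

-- body of A's inner loop: the isinstance test, the lookup_num append, the rec_explore call
def pvInnerA (fuel : Nat) (i : Nat)
    (s : PvGrid × Int × List String) (ii : Nat) : PvGrid × Int × List String :=
  match pvGet s.1 ((i : Int), (ii : Int)) with
  | Sum.inl v =>
      let lk := if s.2.2.contains v then s.2.2 ++ [PySem.Str.lower v] else s.2.2 ++ [v]
      (recExplore v s.2.1 fuel s.1 ((i : Int), (ii : Int)), s.2.1 + 1, lk)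
  | Sum.inr _ => s

def numberize_data (data : List (List String)) : List String :=
  ((List.range data.length).foldl
    (fun s i => (List.range ((data.getD i []).length)).foldl
      (pvInnerA ((data.map List.length).sum + 1) i) s)
    (data.map (fun row => row.map Sum.inl), 1, ["+"])).2.2

-- ===== PORT B =====
-- termination helper for the stack flood fill: relabelling a matching cell lowers pvCount
theorem pvCountP_set_lt (e : String) (nv : Int) :
    ∀ (l : List PvCell) (j : Nat), l.getD j (Sum.inr 0) = Sum.inl e →
      (l.set j (Sum.inr nv)).countP (fun c => decide (c = Sum.inl e)) < l.countP (fun c => decide (c = Sum.inl e))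
  | [], j => by intro h; simp [List.getD] at h
  | c :: t, 0 => by
      intro h
      simp only [List.getD_cons_zero] at h
      subst h
      simp
  | c :: t, j + 1 => by
      intro h
      simp only [List.getD_cons_succ] at h
      have := pvCountP_set_lt e nv t j h
      simp only [List.set_cons_succ, List.countP_cons]
      omega

theorem pvSum_set_lt (e : String) :
    ∀ (g : PvGrid) (i : Nat) (r : List PvCell),
      r.countP (fun c => decide (c = Sum.inl e)) < (g.getD i []).countP (fun c => decide (c = Sum.inl e)) →
      pvCount e (g.set i r) < pvCount e g
  | [], i, r => by intro h; simp [List.getD] at h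
  | row :: t, 0, r => by
      intro h
      simp only [List.getD_cons_zero] at h
      simp only [List.set_cons_zero, pvCount, List.map_cons, List.sum_cons]
      omega
  | row :: t, i + 1, r => by
      intro h
      simp only [List.getD_cons_succ] at h
      have := pvSum_set_lt e t i r h
      simp only [List.set_cons_succ, pvCount, List.map_cons, List.sum_cons] at *
      omega

theorem pvCount_pvSet_lt (e : String) (nv : Int) (g : PvGrid) (p : Int × Int)
    (h : pvGet g p = Sum.inl e) : pvCount e (pvSet g p (Sum.inr nv)) < pvCount e g := by
  unfold pvGet at h
  unfold pvSet
  by_cases hp : 0 ≤ p.1 ∧ 0 ≤ p.2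
  · rw [if_pos hp] at h ⊢
    exact pvSum_set_lt e g _ _ (pvCountP_set_lt e nv _ _ h)
  · rw [if_neg hp] at h
    exact absurd h (by simp)

-- the while-loop of B: pop a point, re-check the guard, relabel, push in-bounds neighbours
def floodStack (e : String) (nv : Int) (g : PvGrid) (stack : List (Int × Int)) : PvGrid :=
  match stack with
  | [] => g
  | p :: s =>
    if h : pvGet g p = Sum.inl e then
      let g' := pvSet g p (Sum.inr nv)
      floodStack e nv g'
        ([((0 : Int), (-1 : Int)), (0, 1), (1, 0), (-1, 0)].foldl
          (fun st o =>
            let q := (p.1 + o.1, p.2 + o.2)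
            if pvInb g' q then q :: st else st) s)
    else floodStack e nv g s
termination_by (pvCount e g, stack.length)
decreasing_by
  · exact Prod.Lex.left _ _ (pvCount_pvSet_lt e nv g p h)
  · exact Prod.Lex.right _ (Nat.lt_succ_self _)

-- body of B's inner loop: same isinstance/lookup logic, iterative flood from a singleton stack
def pvInnerB (i : Nat)
    (s : PvGrid × Int × List String) (ii : Nat) : PvGrid × Int × List String :=
  match pvGet s.1 ((i : Int), (ii : Int)) with
  | Sum.inl v =>
      let lk := if s.2.2.contains v then s.2.2 ++ [PySem.Str.lower v] else s.2.2 ++ [v]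
      (floodStack v s.2.1 s.1 [((i : Int), (ii : Int))], s.2.1 + 1, lk)
  | Sum.inr _ => s

def numberize_data_alt (data : List (List String)) : List String :=
  ((List.range data.length).foldl
    (fun s i => (List.range ((data.getD i []).length)).foldl (pvInnerB i) s)
    (data.map (fun row => row.map Sum.inl), 1, ["+"])).2.2

-- ===== PRECONDITION & SPEC =====
-- Pre_ excludes exactly the ragged grids with some row shorter than row 0, on which the
-- Python A raises IndexError (the flood fill reaches a missing cell of such a row).
def Pre_numberize_data (data : List (List String)) : Prop :=
  ∀ row ∈ data, (data.getD 0 []).length ≤ row.length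
instance (data : List (List String)) : Decidable (Pre_numberize_data data) := by
  unfold Pre_numberize_data; infer_instance

def pvWitness_numberize_data : List (List String) :=
  [["a", "a", "b"], ["c", "a", "b"]]

def Spec_numberize_data (data : List (List String)) (out : List String) : Prop := out = numberize_data_alt data
instance (data : List (List String)) (out : List String) : Decidable (Spec_numberize_data data out) := by unfold Spec_numberize_data; infer_instance

-- ===== CLAIM (what is proved, stated in full; the proofs are below) =====
def Claim_equal_numberize_data : Prop := ∀ (data : List (List String)), Dom_numberize_data data → Pre_numberize_data data → Spec_numberize_data data (numberize_data data)

-- ===== LEMMAS AND PROOFS =====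

theorem pv_foldl_le {α : Type} (m : PvGrid → Nat) (h : PvGrid → α → PvGrid)
    (hm : ∀ g a, m (h g a) ≤ m g) : ∀ (l : List α) (g : PvGrid), m (l.foldl h g) ≤ m g
  | [], _ => le_refl _
  | a :: l, g => le_trans (pv_foldl_le m h hm l (h g a)) (hm g a)

theorem pvCount_rec_le (e : String) (nv : Int) :
    ∀ (f : Nat) (g : PvGrid) (p : Int × Int), pvCount e (recExplore e nv f g p) ≤ pvCount e g := by
  intro f
  induction f with
  | zero => intro g p; simp [recExplore]
  | succ f IH =>
    intro g p
    rw [recExplore]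
    split_ifs with hg
    · exact le_refl _
    · have hlt := pvCount_pvSet_lt e nv g p (not_not.mp hg)
      exact le_trans (pv_foldl_le _ _ (fun g a => IH g a) _ _) (le_of_lt hlt)

theorem pvPush_eq (g' : PvGrid) (p : Int × Int) (s : List (Int × Int)) :
    ([((0 : Int), (-1 : Int)), (0, 1), (1, 0), (-1, 0)].foldl
      (fun st o =>
        let q := (p.1 + o.1, p.2 + o.2)
        if pvInb g' q then q :: st else st) s) = findNewPoints g' p ++ s := by
  simp only [findNewPoints, List.foldl_cons, List.foldl_nil]
  split_ifs <;> simp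

theorem pvKey (e : String) (nv : Int) :
    ∀ (f : Nat) (g : PvGrid) (p : Int × Int) (s : List (Int × Int)), pvCount e g < f →
      floodStack e nv g (p :: s) = floodStack e nv (recExplore e nv f g p) s := by
  intro f
  induction f with
  | zero => intro g p s h; exact absurd h (Nat.not_lt_zero _)
  | succ f IH =>
    intro g p s hf
    by_cases hc : pvGet g p = Sum.inl e
    · have hlt := pvCount_pvSet_lt e nv g p hc
      have hf' : pvCount e (pvSet g p (Sum.inr nv)) < f := by omega
      rw [floodStack]
      simp only [dif_pos hc, pvPush_eq]
      rw [recExplore]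
      rw [if_neg (not_not_intro hc)]
      have aux : ∀ (l : List (Int × Int)) (g₂ : PvGrid) (s₂ : List (Int × Int)),
          pvCount e g₂ < f →
          floodStack e nv g₂ (l ++ s₂) = floodStack e nv (l.foldl (recExplore e nv f) g₂) s₂ := by
        intro l
        induction l with
        | nil => intro g₂ s₂ _; simp
        | cons q l IHl =>
          intro g₂ s₂ h2
          simp only [List.cons_append, List.foldl_cons]
          rw [IH g₂ q (l ++ s₂) h2]
          exact IHl _ _ (lt_of_le_of_lt (pvCount_rec_le e nv f g₂ q) h2)
      exact aux _ _ _ hf'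
    · rw [floodStack]
      simp only [dif_neg hc]
      rw [recExplore, if_pos hc]

theorem pvShape_pvSet (g : PvGrid) (p : Int × Int) (v : PvCell) :
    (pvSet g p v).map List.length = g.map List.length := by
  unfold pvSet
  split_ifs with h
  · rw [List.map_set, List.length_set]
    by_cases hi : p.1.toNat < g.length
    · rw [List.getD_eq_getElem _ _ hi]
      have hlen : g[p.1.toNat].length = (g.map List.length)[p.1.toNat]'(by simpa using hi) := by
        simp
      rw [hlen, List.set_getElem_self]
    · exact List.set_eq_of_length_le (by simpa using Nat.le_of_not_lt hi)
  · rfl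

theorem pv_foldl_shape {α : Type} (h : PvGrid → α → PvGrid)
    (hm : ∀ g a, (h g a).map List.length = g.map List.length) :
    ∀ (l : List α) (g : PvGrid), (l.foldl h g).map List.length = g.map List.length
  | [], _ => rfl
  | a :: l, g => (pv_foldl_shape h hm l (h g a)).trans (hm g a)

theorem pvShape_rec (e : String) (nv : Int) :
    ∀ (f : Nat) (g : PvGrid) (p : Int × Int),
      (recExplore e nv f g p).map List.length = g.map List.length := by
  intro f
  induction f with
  | zero => intro g p; simp [recExplore]
  | succ f IH =>
    intro g p
    rw [recExplore]
    split_ifs with hg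
    · rfl
    · exact (pv_foldl_shape _ (fun g a => IH g a) _ _).trans (pvShape_pvSet g p _)

theorem pvCount_le_sum (e : String) :
    ∀ (g : PvGrid), pvCount e g ≤ (g.map List.length).sum
  | [] => le_refl _
  | row :: t => by
    have h1 := pvCount_le_sum e t
    have h2 := List.countP_le_length (p := fun c => decide (c = Sum.inl e)) (l := row)
    simp only [pvCount, List.map_cons, List.sum_cons] at *
    omega

theorem pv_foldl_congr {σ α : Type} (P : σ → Prop) (f g : σ → α → σ)
    (h : ∀ s a, P s → f s a = g s a ∧ P (f s a)) :
    ∀ (l : List α) (s : σ), P s → l.foldl f s = l.foldl g s ∧ P (l.foldl f s)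
  | [], s, hs => ⟨rfl, hs⟩
  | a :: l, s, hs => by
    obtain ⟨he, hp⟩ := h s a hs
    have hrec := pv_foldl_congr P f g h l (f s a) hp
    simp only [List.foldl_cons]
    rw [← he]
    exact hrec

theorem pvStep_eq (data : List (List String)) (i : Nat)
    (s : PvGrid × Int × List String) (ii : Nat)
    (hP : s.1.map List.length = data.map List.length) :
    pvInnerA ((data.map List.length).sum + 1) i s ii = pvInnerB i s ii ∧
      (pvInnerA ((data.map List.length).sum + 1) i s ii).1.map List.length = data.map List.length := by
  unfold pvInnerA pvInnerB
  cases hcell : pvGet s.1 ((i : Int), (ii : Int)) with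
  | inr n => exact ⟨rfl, hP⟩
  | inl v =>
    have hcnt : pvCount v s.1 < (data.map List.length).sum + 1 := by
      have := pvCount_le_sum v s.1
      rw [hP] at this
      omega
    have hflood : floodStack v s.2.1 s.1 [((i : Int), (ii : Int))]
        = recExplore v s.2.1 ((data.map List.length).sum + 1) s.1 ((i : Int), (ii : Int)) := by
      rw [pvKey v s.2.1 _ s.1 _ [] hcnt, floodStack]
    constructor
    · dsimp only
      rw [hflood]
    · dsimp only
      rw [pvShape_rec]
      exact hP

-- ===== VERDICT (by name: the statement is the Claim_ definition above) =====
theorem numberize_data_spec : Claim_equal_numberize_data := by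
  intro data _dom _pre
  unfold Spec_numberize_data numberize_data numberize_data_alt
  have h0 : ((data.map (fun row => row.map Sum.inl) : PvGrid), (1 : Int), ["+"]).1.map List.length
      = data.map List.length := by
    simp
  have := pv_foldl_congr (fun s : PvGrid × Int × List String => s.1.map List.length = data.map List.length)
    (fun s i => (List.range ((data.getD i []).length)).foldl
      (pvInnerA ((data.map List.length).sum + 1) i) s)
    (fun s i => (List.range ((data.getD i []).length)).foldl (pvInnerB i) s)
    (fun s i hs => pv_foldl_congr _ _ _ (fun s' ii hs' => pvStep_eq data i s' ii hs') _ s hs)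
    (List.range data.length)
    ((data.map (fun row => row.map Sum.inl) : PvGrid), (1 : Int), ["+"]) h0
  rw [this.1]
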